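-- pv_equiv track=rewrite | github.com/CSolatges/La-tournee-du-facteur | newpostman.py | get_odd
-- ===== SOURCE A (Python) =====
-- def get_odd(graph):
--     nodes = set()
--     for i in range(len(graph)):
--         for j in range(len(graph)):
--             if graph[i][j] > 0:
--                 nodes.add(i)
--                 nodes.add(j)
--
--     odd_nodes = []
--     for node in nodes:
--         degree = 0
--         for i in range(len(graph)):
--             if graph[node][i] > 0:
--                 degree += 1
--         if degree % 2 == 1:
--             odd_nodes.append(node)
--     return odd_nodes
-- ===== SOURCE B (Python) =====
-- def get_odd(graph):
--     n = len(graph)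
--     odd_nodes = []
--     for i in range(n):
--         degree = sum(1 for j in range(n) if graph[i][j] > 0)
--         if degree % 2 == 1:
--             odd_nodes.append(i)
--     return odd_nodes
-- ===== Notes on version B (the rewrite author's own statement) =====
-- stated objective: simpler
-- what changed: Drops A's set-building double loop and set iteration entirely: B makes one pass over row indices, counts the positive entries of each row, and appends the index when that count is odd (odd-degree nodes always have a positive row entry, so the node-collection pass is redundant).
import Mathlib
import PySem

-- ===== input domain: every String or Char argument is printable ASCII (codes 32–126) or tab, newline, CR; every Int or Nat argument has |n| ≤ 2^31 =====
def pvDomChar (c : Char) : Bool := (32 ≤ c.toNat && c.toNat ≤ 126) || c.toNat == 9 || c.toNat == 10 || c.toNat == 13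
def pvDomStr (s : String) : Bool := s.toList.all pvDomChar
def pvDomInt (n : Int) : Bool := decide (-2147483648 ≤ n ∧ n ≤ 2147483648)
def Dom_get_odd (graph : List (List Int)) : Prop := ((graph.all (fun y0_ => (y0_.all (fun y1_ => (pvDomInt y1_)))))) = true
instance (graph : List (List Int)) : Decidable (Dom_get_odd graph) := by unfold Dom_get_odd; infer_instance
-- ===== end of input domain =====

-- B replaces A's two-phase "collect touched nodes into a set, then filter that set by odd degree"
-- with a single pass over row indices that appends every index whose row has an odd number of
-- positive entries (simpler; return value only — neither version mutates its argument).


-- ===== PORT A =====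
def get_odd (graph : List (List Int)) : List Int :=
  let n : Int := graph.length
  let nodes : PySem.Set Int :=
    (PySem.List.pyRange 0 n 1).foldl (fun s i =>
      (PySem.List.pyRange 0 n 1).foldl (fun s j =>
        if PySem.List.pyGetD (PySem.List.pyGetD graph i []) j 0 > 0 then
          PySem.Set.add (PySem.Set.add s i) j
        else s) s) PySem.Set.empty
  -- 'for node in nodes': CPython iterates this set of node indices in ASCENDING order whenever no
  -- index reaches the final hash-table size (hash(i) = i lands in slot i); Pre_get_odd restricts to
  -- exactly that regime, so sorted iteration is exact there.
  (PySem.List.sorted nodes (fun x => x) false).foldl (fun odd_nodes node =>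
    let degree : Int :=
      (PySem.List.pyRange 0 n 1).foldl (fun degree i =>
        if PySem.List.pyGetD (PySem.List.pyGetD graph node []) i 0 > 0 then degree + 1 else degree) 0
    if PySem.Int.mod degree 2 == 1 then odd_nodes ++ [node] else odd_nodes) []

-- ===== PORT B =====
def get_odd_alt (graph : List (List Int)) : List Int :=
  let n : Int := graph.length
  (PySem.List.pyRange 0 n 1).foldl (fun odd_nodes i =>
    let degree : Int :=
      (PySem.List.pyRange 0 n 1).foldl (fun acc j =>
        if PySem.List.pyGetD (PySem.List.pyGetD graph i []) j 0 > 0 then acc + 1 else acc) 0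
    if PySem.Int.mod degree 2 == 1 then odd_nodes ++ [i] else odd_nodes) []

-- ===== PRECONDITION & SPEC =====
-- indices 0 ≤ i < n that A's first pass puts into the set: some positive entry in row i or column i
def pvTouched (graph : List (List Int)) : List Nat :=
  (List.range graph.length).filter (fun i =>
    (List.range graph.length).any (fun j =>
      decide ((graph.getD i []).getD j 0 > 0) || decide ((graph.getD j []).getD i 0 > 0)))

-- final CPython set hash-table size after inserting k distinct elements one by one
-- (table starts at 8; after the fill reaches f with 5·f ≥ 3·(size−1) it grows to the
-- smallest power of two greater than 4·f)
def pvSizeFor (k : Nat) : Nat :=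
  (List.range k).foldl (fun S i => if 3 * (S - 1) ≤ 5 * (i + 1) then 2 ^ (Nat.log2 (4 * (i + 1)) + 1) else S) 8

-- Pre_ excludes (a) ragged inputs, where A raises IndexError, and (b) graphs on which some touched
-- node index reaches the final hash-table size of CPython's node set, where A's output order is an
-- accident of set hashing (e.g. [8, 5] in the cite) while B emits ascending order.
def Pre_get_odd (graph : List (List Int)) : Prop :=
  (∀ row ∈ graph, graph.length ≤ row.length) ∧
  (∀ i ∈ pvTouched graph, i < pvSizeFor (pvTouched graph).length)
instance (graph : List (List Int)) : Decidable (Pre_get_odd graph) := by unfold Pre_get_odd; infer_instance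

def pvWitness_get_odd : List (List Int) := [[0, 1, 0], [1, 0, 1], [0, 1, 0]]

def Spec_get_odd (graph : List (List Int)) (out : List Int) : Prop := out = get_odd_alt graph
instance (graph : List (List Int)) (out : List Int) : Decidable (Spec_get_odd graph out) := by unfold Spec_get_odd; infer_instance

-- ===== CLAIM (what is proved, stated in full; the proofs are below) =====
def Claim_equal_get_odd : Prop := ∀ (graph : List (List Int)), Dom_get_odd graph → Pre_get_odd graph → Spec_get_odd graph (get_odd graph)

-- ===== LEMMAS AND PROOFS =====

-- the if-condition of both append loops: "degree of node x is odd"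
def pvOdd (graph : List (List Int)) (n : Int) (x : Int) : Bool :=
  PySem.Int.mod
    ((PySem.List.pyRange 0 n 1).foldl (fun acc j =>
      if PySem.List.pyGetD (PySem.List.pyGetD graph x []) j 0 > 0 then acc + 1 else acc) 0) 2 == 1

theorem pv_mem_inner (graph : List (List Int)) (i : Int) :
    ∀ (l : List Int) (s : PySem.Set Int) (x : Int),
    (x ∈ l.foldl (fun s j =>
        if PySem.List.pyGetD (PySem.List.pyGetD graph i []) j 0 > 0 then
          PySem.Set.add (PySem.Set.add s i) j else s) s)
    ↔ x ∈ s ∨ ∃ j ∈ l, PySem.List.pyGetD (PySem.List.pyGetD graph i []) j 0 > 0 ∧ (x = i ∨ x = j) := by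
  intro l
  induction l with
  | nil => simp
  | cons a t ih =>
    intro s x
    simp only [List.foldl_cons]
    by_cases h : PySem.List.pyGetD (PySem.List.pyGetD graph i []) a 0 > 0
    · rw [if_pos h, ih]
      simp only [PySem.Set.mem_add, List.mem_cons]
      constructor
      · rintro (((hx | hx) | hx) | ⟨j, hj, hq, hx⟩)
        · exact Or.inl hx
        · exact Or.inr ⟨a, Or.inl rfl, h, Or.inl hx⟩
        · exact Or.inr ⟨a, Or.inl rfl, h, Or.inr hx⟩
        · exact Or.inr ⟨j, Or.inr hj, hq, hx⟩
      · rintro (hx | ⟨j, hj | hj, hq, hx⟩)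
        · exact Or.inl (Or.inl (Or.inl hx))
        · subst hj
          rcases hx with hx | hx
          · exact Or.inl (Or.inl (Or.inr hx))
          · exact Or.inl (Or.inr hx)
        · exact Or.inr ⟨j, hj, hq, hx⟩
    · rw [if_neg h, ih]
      constructor
      · rintro (hx | ⟨j, hj, hq, hx⟩)
        · exact Or.inl hx
        · exact Or.inr ⟨j, List.mem_cons_of_mem _ hj, hq, hx⟩
      · rintro (hx | ⟨j, hj, hq, hx⟩)
        · exact Or.inl hx
        · rcases List.mem_cons.mp hj with rfl | hj'
          · exact absurd hq h
          · exact Or.inr ⟨j, hj', hq, hx⟩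

theorem pv_nodup_inner (graph : List (List Int)) (i : Int) :
    ∀ (l : List Int) (s : PySem.Set Int), s.Nodup →
    (l.foldl (fun s j =>
        if PySem.List.pyGetD (PySem.List.pyGetD graph i []) j 0 > 0 then
          PySem.Set.add (PySem.Set.add s i) j else s) s).Nodup := by
  intro l
  induction l with
  | nil => intro s hs; simpa using hs
  | cons a t ih =>
    intro s hs
    simp only [List.foldl_cons]
    split_ifs with h
    · exact ih _ (PySem.Set.nodup_add _ _ (PySem.Set.nodup_add _ _ hs))
    · exact ih _ hs

theorem pv_mem_outer (graph : List (List Int)) (r : List Int) :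
    ∀ (l : List Int) (s : PySem.Set Int) (x : Int),
    (x ∈ l.foldl (fun s i => r.foldl (fun s j =>
        if PySem.List.pyGetD (PySem.List.pyGetD graph i []) j 0 > 0 then
          PySem.Set.add (PySem.Set.add s i) j else s) s) s)
    ↔ x ∈ s ∨ ∃ i ∈ l, ∃ j ∈ r,
        PySem.List.pyGetD (PySem.List.pyGetD graph i []) j 0 > 0 ∧ (x = i ∨ x = j) := by
  intro l
  induction l with
  | nil => simp
  | cons a t ih =>
    intro s x
    simp only [List.foldl_cons]
    rw [ih, pv_mem_inner]
    simp only [List.mem_cons]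
    constructor
    · rintro ((hx | ⟨j, hj, hq, hx⟩) | ⟨i, hi, j, hj, hq, hx⟩)
      · exact Or.inl hx
      · exact Or.inr ⟨a, Or.inl rfl, j, hj, hq, hx⟩
      · exact Or.inr ⟨i, Or.inr hi, j, hj, hq, hx⟩
    · rintro (hx | ⟨i, hi | hi, j, hj, hq, hx⟩)
      · exact Or.inl (Or.inl hx)
      · subst hi; exact Or.inl (Or.inr ⟨j, hj, hq, hx⟩)
      · exact Or.inr ⟨i, hi, j, hj, hq, hx⟩

theorem pv_nodup_outer (graph : List (List Int)) (r : List Int) :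
    ∀ (l : List Int) (s : PySem.Set Int), s.Nodup →
    (l.foldl (fun s i => r.foldl (fun s j =>
        if PySem.List.pyGetD (PySem.List.pyGetD graph i []) j 0 > 0 then
          PySem.Set.add (PySem.Set.add s i) j else s) s) s).Nodup := by
  intro l
  induction l with
  | nil => intro s hs; simpa using hs
  | cons a t ih =>
    intro s hs
    simp only [List.foldl_cons]
    exact ih _ (pv_nodup_inner graph a r s hs)

def pvNodes (graph : List (List Int)) : PySem.Set Int :=
  (PySem.List.pyRange 0 (graph.length : Int) 1).foldl (fun s i =>
    (PySem.List.pyRange 0 (graph.length : Int) 1).foldl (fun s j =>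
      if PySem.List.pyGetD (PySem.List.pyGetD graph i []) j 0 > 0 then
        PySem.Set.add (PySem.Set.add s i) j
      else s) s) PySem.Set.empty

theorem pv_append_loop (p : Int → Bool) (l : List Int) :
    l.foldl (fun acc node => if p node then acc ++ [node] else acc) [] = l.filter p := by
  simpa using PySem.List.foldl_append_if p (fun x => x) l []

theorem pv_getA (graph : List (List Int)) :
    get_odd graph = (PySem.List.sorted (pvNodes graph) (fun x => x) false).filter
      (pvOdd graph (graph.length : Int)) := by
  rw [← pv_append_loop]
  rfl

theorem pv_getB (graph : List (List Int)) :
    get_odd_alt graph = (PySem.List.pyRange 0 (graph.length : Int) 1).filter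
      (pvOdd graph (graph.length : Int)) := by
  rw [← pv_append_loop]
  rfl

theorem pv_odd_has_edge (graph : List (List Int)) (n x : Int)
    (hx : pvOdd graph n x = true) :
    ∃ j ∈ PySem.List.pyRange 0 n 1,
      PySem.List.pyGetD (PySem.List.pyGetD graph x []) j 0 > 0 := by
  unfold pvOdd at hx
  rw [show (fun (acc : Int) (j : Int) =>
        if PySem.List.pyGetD (PySem.List.pyGetD graph x []) j 0 > 0 then acc + 1 else acc)
      = (fun acc j => if (decide (PySem.List.pyGetD (PySem.List.pyGetD graph x []) j 0 > 0)) then acc + 1 else acc)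
      from by funext acc j; split_ifs <;> simp_all <;> omega] at hx
  rw [PySem.List.foldl_count_if] at hx
  by_contra hno
  push Not at hno
  have hz : (PySem.List.pyRange 0 n 1).countP
      (fun j => decide (PySem.List.pyGetD (PySem.List.pyGetD graph x []) j 0 > 0)) = 0 := by
    rw [List.countP_eq_zero]
    intro j hj
    simpa using hno j hj
  rw [hz] at hx
  norm_num at hx

theorem pv_main (graph : List (List Int)) : get_odd graph = get_odd_alt graph := by
  rw [pv_getA, pv_getB]
  have hmem := pv_mem_outer graph (PySem.List.pyRange 0 (graph.length : Int) 1)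
    (PySem.List.pyRange 0 (graph.length : Int) 1) PySem.Set.empty
  have hnodupN : (pvNodes graph).Nodup :=
    pv_nodup_outer graph _ _ PySem.Set.empty List.nodup_nil
  have hsp := PySem.List.sorted_perm (pvNodes graph) (fun x => x) false
  apply PySem.List.eq_of_perm_of_pairwise_le_of_injective (fun x => x) Function.injective_id
  · rw [List.perm_ext_iff_of_nodup (List.Nodup.filter _ (hsp.nodup_iff.mpr hnodupN))
      (List.Nodup.filter _ (PySem.List.nodup_pyRange_one 0 (graph.length : Int)))]
    intro x
    simp only [List.mem_filter, PySem.List.mem_sorted, PySem.List.mem_pyRange_one]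
    constructor
    · rintro ⟨hxN, hP⟩
      refine ⟨?_, hP⟩
      rcases (hmem x).mp hxN with h | ⟨i, hi, j, hj, _, hx | hx⟩
      · simp [PySem.Set.empty] at h
      · subst hx; exact PySem.List.mem_pyRange_one.mp hi
      · subst hx; exact PySem.List.mem_pyRange_one.mp hj
    · rintro ⟨hxr, hP⟩
      refine ⟨?_, hP⟩
      obtain ⟨j, hj, hq⟩ := pv_odd_has_edge graph _ x hP
      exact (hmem x).mpr (Or.inr ⟨x, PySem.List.mem_pyRange_one.mpr hxr, j, hj, hq, Or.inl rfl⟩)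
  · exact List.Pairwise.filter _ (PySem.List.sorted_pairwise (pvNodes graph) (fun x => x))
  · exact List.Pairwise.filter _
      ((PySem.List.pairwise_lt_pyRange_one 0 (graph.length : Int)).imp le_of_lt)

-- ===== VERDICT (by name: the statement is the Claim_ definition above) =====
theorem get_odd_spec : Claim_equal_get_odd := by
  intro graph _ _
  unfold Spec_get_odd
  exact pv_main graph
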